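-- pv_equiv track=rewrite | github.com/alusilo/prosodic | prosodic/langs/german/german_functions.py | get_word_stress_pattern
-- ===== SOURCE A (Python) =====
-- def get_word_stress_pattern(word):
--     """Get the stress pattern of a German word"""
--     # German stress patterns:
--     # 1. Default: stress on first syllable
--     # 2. Prefixes: usually unstressed
--     # 3. Compounds: primary stress on first element
--     # 4. Suffixes: some affect stress placement
--
--     if not word:
--         return "none"
--
--     # Define common unstressed prefixes
--     prefixes = {'ge', 'be', 'ver', 'zer', 'ent', 'er', 'emp', 'miss'}
--
--     # Check if word starts with a common unstressed prefix
--     for prefix in prefixes: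
--         if word.lower().startswith(prefix) and len(word) > len(prefix):
--             return "prefix"
--
--     # Default to first syllable stress
--     return "first"
-- ===== SOURCE B (Python) =====
-- def get_word_stress_pattern(word):
--     """Get the stress pattern of a German word"""
--     if not word:
--         return "none"
--     w = word.lower()
--     n = len(word)
--     c0 = w[:1]
--     if c0 == 'g' or c0 == 'b':
--         return "prefix" if n > 2 and w[1:2] == 'e' else "first"
--     if c0 == 'v' or c0 == 'z':
--         return "prefix" if n > 3 and w[1:3] == 'er' else "first"
--     if c0 == 'm':
--         return "prefix" if n > 4 and w[1:4] == 'iss' else "first"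
--     if c0 == 'e':
--         if n > 2 and w[1:2] == 'r':
--             return "prefix"
--         if n > 3 and (w[1:3] == 'nt' or w[1:3] == 'mp'):
--             return "prefix"
--         return "first"
--     return "first"
-- ===== Notes on version B (the rewrite author's own statement) =====
-- stated objective: alternative
-- what changed: Replaces A's loop over a set of prefix strings (lowercasing the word and calling startswith per prefix) with a hand-compiled decision tree that lowercases once and branches on the first character, then checks only the one or two candidate continuations by slice comparison.
import Mathlib
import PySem

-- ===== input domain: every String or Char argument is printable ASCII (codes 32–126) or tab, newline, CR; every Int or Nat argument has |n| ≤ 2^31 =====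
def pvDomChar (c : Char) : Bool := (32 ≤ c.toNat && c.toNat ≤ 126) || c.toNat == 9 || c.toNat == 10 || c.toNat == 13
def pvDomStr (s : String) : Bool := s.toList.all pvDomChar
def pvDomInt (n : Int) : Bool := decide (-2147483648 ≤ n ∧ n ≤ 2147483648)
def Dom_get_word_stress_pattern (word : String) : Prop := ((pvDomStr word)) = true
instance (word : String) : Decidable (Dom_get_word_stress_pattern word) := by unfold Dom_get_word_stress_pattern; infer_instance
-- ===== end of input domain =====

-- B lowercases the word once and replaces A's loop over the prefix set with a
-- hand-compiled decision tree on the leading characters (alternative; same behaviour).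

-- ===== PORT A =====
-- the 'for prefix in prefixes: if …: return "prefix"' loop (the set iterated in a fixed order;
-- every iteration that fires returns the same value, so the set's iteration order is immaterial)
def pvALoop (word : String) : List String → String
  | [] => "first"
  | p :: ps =>
    if PySem.Str.startswith (PySem.Str.lower word) p
        && decide (PySem.Str.len word > PySem.Str.len p) then "prefix"
    else pvALoop word ps

def get_word_stress_pattern (word : String) : String :=
  if PySem.Str.len word = 0 then "none"
  else pvALoop word ["ge", "be", "ver", "zer", "ent", "er", "emp", "miss"]

-- ===== PORT B =====
-- Source B's decision tree: branch on the first lowered character, then compare the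
-- one or two candidate continuations by slicing
def get_word_stress_pattern_alt (word : String) : String :=
  if PySem.Str.len word = 0 then "none"
  else
    let w := PySem.Str.lower word
    let n := PySem.Str.len word
    let c0 := PySem.Str.slice w none (some 1)
    if c0 == "g" || c0 == "b" then
      if decide (n > 2) && (PySem.Str.slice w (some 1) (some 2) == "e") then "prefix" else "first"
    else if c0 == "v" || c0 == "z" then
      if decide (n > 3) && (PySem.Str.slice w (some 1) (some 3) == "er") then "prefix" else "first"
    else if c0 == "m" then
      if decide (n > 4) && (PySem.Str.slice w (some 1) (some 4) == "iss") then "prefix" else "first"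
    else if c0 == "e" then
      if decide (n > 2) && (PySem.Str.slice w (some 1) (some 2) == "r") then "prefix"
      else if decide (n > 3) && ((PySem.Str.slice w (some 1) (some 3) == "nt")
                || (PySem.Str.slice w (some 1) (some 3) == "mp")) then "prefix"
      else "first"
    else "first"

-- ===== PRECONDITION & SPEC =====
def Spec_get_word_stress_pattern (word : String) (out : String) : Prop := out = get_word_stress_pattern_alt word
instance (word : String) (out : String) : Decidable (Spec_get_word_stress_pattern word out) := by unfold Spec_get_word_stress_pattern; infer_instance

-- ===== CLAIM (what is proved, stated in full; the proofs are below) =====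
def Claim_equal_get_word_stress_pattern : Prop := ∀ (word : String), Dom_get_word_stress_pattern word → Spec_get_word_stress_pattern word (get_word_stress_pattern word)

-- ===== LEMMAS AND PROOFS =====

-- the common atom both programs test: the word is strictly longer than k and its
-- lowered form starts with the k-character prefix p
def pvHit (l : List Char) (k : Nat) (p : List Char) : Prop :=
  k < l.length ∧ (PySem.Chars.lower l).take k = p

-- the disjunction of the eight per-prefix hits, in A's iteration order
def pvD (l : List Char) : Prop :=
  pvHit l 2 ['g','e'] ∨ pvHit l 2 ['b','e'] ∨ pvHit l 3 ['v','e','r'] ∨ pvHit l 3 ['z','e','r']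
    ∨ pvHit l 3 ['e','n','t'] ∨ pvHit l 2 ['e','r'] ∨ pvHit l 3 ['e','m','p'] ∨ pvHit l 4 ['m','i','s','s']

-- A's per-prefix test is a pvHit
theorem pvA_cond (word p : String) (k : Nat) (hk : p.toList.length = k) :
    (PySem.Str.startswith (PySem.Str.lower word) p
      && decide (PySem.Str.len word > PySem.Str.len p)) = true ↔
    pvHit word.toList k p.toList := by
  simp only [Bool.and_eq_true, decide_eq_true_eq, pvHit]
  rw [PySem.Str.startswith_eq, PySem.Chars.startswith_iff]
  constructor
  · rintro ⟨hpre, hlen⟩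
    refine ⟨by simp only [PySem.Str.len_eq] at hlen; exact_mod_cast (hk ▸ hlen), ?_⟩
    have := (List.prefix_iff_eq_take.mp hpre).symm
    rw [← hk]
    simpa [PySem.Str.toList_lower] using this
  · rintro ⟨hlen, htake⟩
    refine ⟨?_, ?_⟩
    · rw [List.prefix_iff_eq_take, hk]
      simpa [PySem.Str.toList_lower] using htake.symm
    · simp only [PySem.Str.len_eq]
      exact_mod_cast (hk ▸ hlen)

-- B's first-character test w[:1] == p, as a take of the lowered character list
theorem pvB_c0 (word p : String) :
    (PySem.Str.slice (PySem.Str.lower word) none (some 1) == p) = true ↔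
      (PySem.Chars.lower word.toList).take 1 = p.toList := by
  rw [beq_iff_eq, ← String.toList_inj, show ((1:Int)) = ((1:Nat):Int) by norm_num,
    PySem.Str.toList_slice, PySem.Chars.slice_eq_listSlice, PySem.List.slice_to_natCast,
    PySem.Str.toList_lower]

-- B's slice w[1:b] of the lowered word is a drop-then-take on the lowered character list
theorem pv_slice_drop_take (word : String) (b : Nat) :
    (PySem.Str.slice (PySem.Str.lower word) (some 1) (some (b : Int))).toList =
      ((PySem.Chars.lower word.toList).drop 1).take (b - 1) := by
  rw [PySem.Str.toList_slice, PySem.Chars.slice_eq_listSlice,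
    show ((1:Int)) = ((1:Nat):Int) by norm_num, PySem.List.slice_natCast,
    PySem.Str.toList_lower]

-- B's continuation test w[1:b] == t, as a drop-then-take of the lowered character list
theorem pvB_tail (word t : String) (b : Nat) :
    (PySem.Str.slice (PySem.Str.lower word) (some 1) (some (b : Int)) == t) = true ↔
      ((PySem.Chars.lower word.toList).drop 1).take (b - 1) = t.toList := by
  rw [beq_iff_eq, ← String.toList_inj, pv_slice_drop_take]

theorem pvB_tail2 (word t : String) :
    (PySem.Str.slice (PySem.Str.lower word) (some 1) (some 2) == t) = true ↔
      ((PySem.Chars.lower word.toList).drop 1).take 1 = t.toList := by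
  rw [show ((2:Int)) = ((2:Nat):Int) by norm_num]; exact pvB_tail word t 2

theorem pvB_tail3 (word t : String) :
    (PySem.Str.slice (PySem.Str.lower word) (some 1) (some 3) == t) = true ↔
      ((PySem.Chars.lower word.toList).drop 1).take 2 = t.toList := by
  rw [show ((3:Int)) = ((3:Nat):Int) by norm_num]; exact pvB_tail word t 3

theorem pvB_tail4 (word t : String) :
    (PySem.Str.slice (PySem.Str.lower word) (some 1) (some 4) == t) = true ↔
      ((PySem.Chars.lower word.toList).drop 1).take 3 = t.toList := by
  rw [show ((4:Int)) = ((4:Nat):Int) by norm_num]; exact pvB_tail word t 4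

-- B's length tests
theorem pvB_len2 (word : String) :
    (decide (PySem.Str.len word > (2:Int))) = true ↔ 2 < word.toList.length := by
  simp [PySem.Str.len_eq]
theorem pvB_len3 (word : String) :
    (decide (PySem.Str.len word > (3:Int))) = true ↔ 3 < word.toList.length := by
  simp [PySem.Str.len_eq]
theorem pvB_len4 (word : String) :
    (decide (PySem.Str.len word > (4:Int))) = true ↔ 4 < word.toList.length := by
  simp [PySem.Str.len_eq]

-- splitting a take into its first character and the take of the tail
theorem pv_take2 (l : List Char) (c1 c2 : Char) :
    l.take 2 = [c1, c2] ↔ l.take 1 = [c1] ∧ (l.drop 1).take 1 = [c2] := by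
  cases l <;> simp
theorem pv_take3 (l : List Char) (c1 c2 c3 : Char) :
    l.take 3 = [c1, c2, c3] ↔ l.take 1 = [c1] ∧ (l.drop 1).take 2 = [c2, c3] := by
  cases l <;> simp
theorem pv_take4 (l : List Char) (c1 c2 c3 c4 : Char) :
    l.take 4 = [c1, c2, c3, c4] ↔ l.take 1 = [c1] ∧ (l.drop 1).take 3 = [c2, c3, c4] := by
  cases l <;> simp

-- if some prefix in the list satisfies A's test, the loop returns "prefix"
theorem pvA_loop_mem (word : String) (L : List String) (p : String) (hp : p ∈ L)
    (hc : (PySem.Str.startswith (PySem.Str.lower word) p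
      && decide (PySem.Str.len word > PySem.Str.len p)) = true) :
    pvALoop word L = "prefix" := by
  induction L with
  | nil => cases hp
  | cons q qs ih =>
    simp only [pvALoop]
    rcases List.mem_cons.mp hp with rfl | hmem
    · rw [if_pos hc]
    · by_cases hq : (PySem.Str.startswith (PySem.Str.lower word) q
          && decide (PySem.Str.len word > PySem.Str.len q)) = true
      · rw [if_pos hq]
      · rw [if_neg hq]; exact ih hmem

theorem pvA_loop_prefix (word : String) (h : pvD word.toList) :
    pvALoop word ["ge", "be", "ver", "zer", "ent", "er", "emp", "miss"] = "prefix" := by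
  rcases h with h|h|h|h|h|h|h|h
  · exact pvA_loop_mem word _ "ge" (by simp) ((pvA_cond word "ge" 2 (by decide)).mpr h)
  · exact pvA_loop_mem word _ "be" (by simp) ((pvA_cond word "be" 2 (by decide)).mpr h)
  · exact pvA_loop_mem word _ "ver" (by simp) ((pvA_cond word "ver" 3 (by decide)).mpr h)
  · exact pvA_loop_mem word _ "zer" (by simp) ((pvA_cond word "zer" 3 (by decide)).mpr h)
  · exact pvA_loop_mem word _ "ent" (by simp) ((pvA_cond word "ent" 3 (by decide)).mpr h)
  · exact pvA_loop_mem word _ "er" (by simp) ((pvA_cond word "er" 2 (by decide)).mpr h)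
  · exact pvA_loop_mem word _ "emp" (by simp) ((pvA_cond word "emp" 3 (by decide)).mpr h)
  · exact pvA_loop_mem word _ "miss" (by simp) ((pvA_cond word "miss" 4 (by decide)).mpr h)

theorem pvA_loop_first (word : String) (h : ¬ pvD word.toList) :
    pvALoop word ["ge", "be", "ver", "zer", "ent", "er", "emp", "miss"] = "first" := by
  unfold pvD at h
  push Not at h
  simp only [pvALoop]
  rw [if_neg (fun hc => h.1 ((pvA_cond word "ge" 2 (by decide)).mp hc)),
    if_neg (fun hc => h.2.1 ((pvA_cond word "be" 2 (by decide)).mp hc)),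
    if_neg (fun hc => h.2.2.1 ((pvA_cond word "ver" 3 (by decide)).mp hc)),
    if_neg (fun hc => h.2.2.2.1 ((pvA_cond word "zer" 3 (by decide)).mp hc)),
    if_neg (fun hc => h.2.2.2.2.1 ((pvA_cond word "ent" 3 (by decide)).mp hc)),
    if_neg (fun hc => h.2.2.2.2.2.1 ((pvA_cond word "er" 2 (by decide)).mp hc)),
    if_neg (fun hc => h.2.2.2.2.2.2.1 ((pvA_cond word "emp" 3 (by decide)).mp hc)),
    if_neg (fun hc => h.2.2.2.2.2.2.2 ((pvA_cond word "miss" 4 (by decide)).mp hc))]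

theorem pvB_tree_prefix (word : String) (h0 : ¬ PySem.Str.len word = 0) (h : pvD word.toList) :
    get_word_stress_pattern_alt word = "prefix" := by
  unfold get_word_stress_pattern_alt
  rw [if_neg h0]
  simp only [Bool.or_eq_true, Bool.and_eq_true, pvB_c0, pvB_tail2, pvB_tail3, pvB_tail4,
    pvB_len2, pvB_len3, pvB_len4,
    show ("g":String).toList = ['g'] from rfl, show ("b":String).toList = ['b'] from rfl,
    show ("v":String).toList = ['v'] from rfl, show ("z":String).toList = ['z'] from rfl,
    show ("m":String).toList = ['m'] from rfl, show ("e":String).toList = ['e'] from rfl,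
    show ("r":String).toList = ['r'] from rfl, show ("er":String).toList = ['e','r'] from rfl,
    show ("iss":String).toList = ['i','s','s'] from rfl,
    show ("nt":String).toList = ['n','t'] from rfl, show ("mp":String).toList = ['m','p'] from rfl]
  rcases h with ⟨hn,ht⟩|⟨hn,ht⟩|⟨hn,ht⟩|⟨hn,ht⟩|⟨hn,ht⟩|⟨hn,ht⟩|⟨hn,ht⟩|⟨hn,ht⟩
  · obtain ⟨h1, h2⟩ := (pv_take2 _ _ _).mp ht
    simp only [List.drop_one] at h2
    simp [h1, h2, show 2 < word.length from by simpa using hn]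
  · obtain ⟨h1, h2⟩ := (pv_take2 _ _ _).mp ht
    simp only [List.drop_one] at h2
    simp [h1, h2, show 2 < word.length from by simpa using hn]
  · obtain ⟨h1, h2⟩ := (pv_take3 _ _ _ _).mp ht
    simp only [List.drop_one] at h2
    simp [h1, h2, show 3 < word.length from by simpa using hn]
  · obtain ⟨h1, h2⟩ := (pv_take3 _ _ _ _).mp ht
    simp only [List.drop_one] at h2
    simp [h1, h2, show 3 < word.length from by simpa using hn]
  · obtain ⟨h1, h2⟩ := (pv_take3 _ _ _ _).mp ht
    simp only [List.drop_one] at h2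
    simp [h1, h2, show 3 < word.length from by simpa using hn]
  · obtain ⟨h1, h2⟩ := (pv_take2 _ _ _).mp ht
    simp only [List.drop_one] at h2
    simp [h1, h2, show 2 < word.length from by simpa using hn]
  · obtain ⟨h1, h2⟩ := (pv_take3 _ _ _ _).mp ht
    simp only [List.drop_one] at h2
    simp [h1, h2, show 3 < word.length from by simpa using hn]
  · obtain ⟨h1, h2⟩ := (pv_take4 _ _ _ _ _).mp ht
    simp only [List.drop_one] at h2
    simp [h1, h2, show 4 < word.length from by simpa using hn]

theorem pvB_tree_first (word : String) (h0 : ¬ PySem.Str.len word = 0) (h : ¬ pvD word.toList) :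
    get_word_stress_pattern_alt word = "first" := by
  unfold get_word_stress_pattern_alt
  rw [if_neg h0]
  simp only [Bool.or_eq_true, Bool.and_eq_true, pvB_c0, pvB_tail2, pvB_tail3, pvB_tail4,
    pvB_len2, pvB_len3, pvB_len4,
    show ("g":String).toList = ['g'] from rfl, show ("b":String).toList = ['b'] from rfl,
    show ("v":String).toList = ['v'] from rfl, show ("z":String).toList = ['z'] from rfl,
    show ("m":String).toList = ['m'] from rfl, show ("e":String).toList = ['e'] from rfl,
    show ("r":String).toList = ['r'] from rfl, show ("er":String).toList = ['e','r'] from rfl,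
    show ("iss":String).toList = ['i','s','s'] from rfl,
    show ("nt":String).toList = ['n','t'] from rfl, show ("mp":String).toList = ['m','p'] from rfl]
  unfold pvD pvHit at h
  push Not at h
  split_ifs with hc1 hi1 hc2 hi2 hc3 hi3 hc4 hi4 hi5 <;> try rfl
  · obtain ⟨hl, he⟩ := hi1
    rcases hc1 with hg | hb
    · exact absurd ((pv_take2 _ _ _).mpr ⟨hg, he⟩) (h.1 hl)
    · exact absurd ((pv_take2 _ _ _).mpr ⟨hb, he⟩) (h.2.1 hl)
  · obtain ⟨hl, he⟩ := hi2
    rcases hc2 with hv | hz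
    · exact absurd ((pv_take3 _ _ _ _).mpr ⟨hv, he⟩) (h.2.2.1 hl)
    · exact absurd ((pv_take3 _ _ _ _).mpr ⟨hz, he⟩) (h.2.2.2.1 hl)
  · obtain ⟨hl, he⟩ := hi3
    exact absurd ((pv_take4 _ _ _ _ _).mpr ⟨hc3, he⟩) (h.2.2.2.2.2.2.2 hl)
  · obtain ⟨hl, he⟩ := hi4
    exact absurd ((pv_take2 _ _ _).mpr ⟨hc4, he⟩) (h.2.2.2.2.2.1 hl)
  · obtain ⟨hl, he⟩ := hi5
    rcases he with hnt | hmp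
    · exact absurd ((pv_take3 _ _ _ _).mpr ⟨hc4, hnt⟩) (h.2.2.2.2.1 hl)
    · exact absurd ((pv_take3 _ _ _ _).mpr ⟨hc4, hmp⟩) (h.2.2.2.2.2.2.1 hl)

-- ===== VERDICT (by name: the statement is the Claim_ definition above) =====
theorem get_word_stress_pattern_spec : Claim_equal_get_word_stress_pattern := by
  unfold Claim_equal_get_word_stress_pattern
  intro word _
  unfold Spec_get_word_stress_pattern get_word_stress_pattern
  by_cases h0 : PySem.Str.len word = 0
  · rw [if_pos h0]
    unfold get_word_stress_pattern_alt
    rw [if_pos h0]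
  · rw [if_neg h0]
    by_cases hD : pvD word.toList
    · rw [pvA_loop_prefix word hD, pvB_tree_prefix word h0 hD]
    · rw [pvA_loop_first word hD, pvB_tree_first word h0 hD]
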